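-- pv_equiv track=rewrite | github.com/DanielYeray5/problematicas | 3sat.py | adaptacion_3sat
-- ===== SOURCE A (Python) =====
-- def adaptacion_3sat(gen, solucion):
--     # Contar Cláusulas correctas
--     n = 3
--     cont = 0
--     clausula_ok = True
--     for i in range(len(gen)):
--         n = n - 1
--         if gen[i] != solucion[i]:
--             clausula_ok = False
--         if n == 0:
--             if clausula_ok:
--                 cont = cont + 1
--             n = 3
--             clausula_ok = True
--     return cont
-- ===== SOURCE B (Python) =====
-- def adaptacion_3sat(gen, solucion):
--     # Build the per-position match table first, then count complete matching triples.
--     m = [gen[i] == solucion[i] for i in range(len(gen))]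
--     return sum(1 for j in range(len(gen) // 3) if all(m[3 * j:3 * j + 3]))
-- ===== Notes on version B (the rewrite author's own statement) =====
-- stated objective: alternative
-- what changed: A's single stateful pass with a countdown n and a clausula_ok flag is replaced by building a boolean match table and then summing, per complete triple index j < len(gen)//3, whether the slice m[3j:3j+3] is all True.
import Mathlib
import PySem

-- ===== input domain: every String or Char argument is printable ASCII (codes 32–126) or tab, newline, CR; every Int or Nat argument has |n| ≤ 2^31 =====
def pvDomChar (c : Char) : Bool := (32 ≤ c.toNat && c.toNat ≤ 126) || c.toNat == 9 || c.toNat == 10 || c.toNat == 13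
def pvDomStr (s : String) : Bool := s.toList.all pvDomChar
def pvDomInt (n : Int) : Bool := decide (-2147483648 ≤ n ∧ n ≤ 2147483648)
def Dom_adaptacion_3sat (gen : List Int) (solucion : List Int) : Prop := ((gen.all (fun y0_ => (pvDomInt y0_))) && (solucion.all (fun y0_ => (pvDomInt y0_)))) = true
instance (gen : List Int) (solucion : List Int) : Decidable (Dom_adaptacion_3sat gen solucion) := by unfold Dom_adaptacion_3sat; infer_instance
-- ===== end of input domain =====

-- B builds the match table first and counts complete all-True triples; alternative decomposition, same cost.

-- ===== PORT A =====
-- single pass with state (n, cont, clausula_ok); gen[i]/solucion[i] read via pyGetD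
-- (in range under Pre_, exactly where Python does not raise IndexError)
def adaptacion_3sat (gen : List Int) (solucion : List Int) : Int :=
  let st := (PySem.List.pyRange 0 gen.length 1).foldl
    (fun (s : Int × Int × Bool) i =>
      let n := s.1 - 1
      let ok := if PySem.List.pyGetD gen i 0 ≠ PySem.List.pyGetD solucion i 0 then false else s.2.2
      if n = 0 then (3, s.2.1 + (if ok then 1 else 0), true) else (n, s.2.1, ok))
    (3, 0, true)
  st.2.1

-- ===== PORT B =====
def adaptacion_3sat_alt (gen : List Int) (solucion : List Int) : Int :=
  let m := (PySem.List.pyRange 0 gen.length 1).map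
    (fun i => PySem.List.pyGetD gen i 0 == PySem.List.pyGetD solucion i 0)
  ((PySem.List.pyRange 0 (PySem.Int.floordiv gen.length 3) 1).map
    (fun j => if (PySem.List.slice m (some (3 * j)) (some (3 * j + 3))).all id then (1 : Int) else 0)).sum

-- ===== PRECONDITION & SPEC =====
-- A (and B) raise IndexError when solucion is shorter than gen; exactly those inputs are excluded.
def Pre_adaptacion_3sat (gen : List Int) (solucion : List Int) : Prop := gen.length ≤ solucion.length
instance (gen : List Int) (solucion : List Int) : Decidable (Pre_adaptacion_3sat gen solucion) := by unfold Pre_adaptacion_3sat; infer_instance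
def pvWitness_adaptacion_3sat : List Int × List Int := ([1, 0, 1, 1, 1, 0], [1, 0, 1, 0, 1, 0])
def Spec_adaptacion_3sat (gen : List Int) (solucion : List Int) (out : Int) : Prop := out = adaptacion_3sat_alt gen solucion
instance (gen : List Int) (solucion : List Int) (out : Int) : Decidable (Spec_adaptacion_3sat gen solucion out) := by unfold Spec_adaptacion_3sat; infer_instance

-- ===== CLAIM (what is proved, stated in full; the proofs are below) =====
def Claim_equal_adaptacion_3sat : Prop := ∀ (gen : List Int) (solucion : List Int), Dom_adaptacion_3sat gen solucion → Pre_adaptacion_3sat gen solucion → Spec_adaptacion_3sat gen solucion (adaptacion_3sat gen solucion)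

-- ===== LEMMAS AND PROOFS =====

-- the match table both programs are about
def pvMatch (gen solucion : List Int) : List Bool :=
  (List.range gen.length).map
    (fun (i : Nat) => PySem.List.pyGetD gen (i : Int) 0 == PySem.List.pyGetD solucion (i : Int) 0)

-- A's loop step, expressed on the match boolean (the value gen[i] == solucion[i])
def pvStep (s : Int × Int × Bool) (b : Bool) : Int × Int × Bool :=
  if s.1 - 1 = 0 then (3, s.2.1 + (if b && s.2.2 then 1 else 0), true) else (s.1 - 1, s.2.1, b && s.2.2)

-- common specification: count of complete all-true triples, by structural recursion in chunks of 3
def pvTri : List Bool → Int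
  | a :: b :: c :: r => (if a && b && c then 1 else 0) + pvTri r
  | _ => 0

theorem pvStep_cont_add (m : List Bool) : ∀ (n c : Int) (ok : Bool),
    (m.foldl pvStep (n, c, ok)).2.1 = c + (m.foldl pvStep (n, 0, ok)).2.1 := by
  induction m with
  | nil => intro n c ok; simp
  | cons b m ih =>
    intro n c ok
    simp only [List.foldl_cons, pvStep]
    by_cases h : n - 1 = 0
    · simp only [if_pos h]
      have h1 := ih 3 (c + (if b && ok then (1 : Int) else 0)) true
      have h2 := ih 3 (0 + (if b && ok then (1 : Int) else 0)) true
      rw [h1, h2]; ring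
    · simp only [if_neg h]
      exact ih _ _ _

theorem pvFoldl_eq_pvTri (m : List Bool) : (m.foldl pvStep (3, 0, true)).2.1 = pvTri m := by
  induction m using pvTri.induct with
  | case1 a b c r ih =>
    show ((a :: b :: c :: r).foldl pvStep (3, 0, true)).2.1 = _
    simp only [List.foldl_cons]
    have h1 : pvStep (3, 0, true) a = (2, 0, a && true) := by simp [pvStep]
    have h2 : pvStep (2, 0, a && true) b = (1, 0, b && (a && true)) := by simp [pvStep]
    have h3 : pvStep (1, 0, b && (a && true)) c
        = (3, 0 + (if c && (b && (a && true)) then 1 else 0), true) := by simp [pvStep]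
    rw [h1, h2, h3, pvStep_cont_add, ih, pvTri]
    cases a <;> cases b <;> cases c <;> simp
  | case2 t h =>
    match t, h with
    | [], _ => simp [pvTri]
    | [a], _ => simp [List.foldl, pvStep, pvTri]
    | [a, b], _ => simp [List.foldl, pvStep, pvTri]
    | a :: b :: c :: r, h => exact (h a b c r rfl).elim

theorem pvA_eq_foldl (gen solucion : List Int) :
    adaptacion_3sat gen solucion = ((pvMatch gen solucion).foldl pvStep (3, 0, true)).2.1 := by
  unfold adaptacion_3sat pvMatch
  rw [PySem.List.pyRange_zero_natCast, List.foldl_map, List.foldl_map]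
  refine congrArg (fun p : Int × Int × Bool => p.2.1) (PySem.List.foldl_congr_mem _ _ _ _ ?_)
  intro s i _
  simp only [pvStep]
  by_cases hq : PySem.List.pyGetD gen (i : Int) 0 = PySem.List.pyGetD solucion (i : Int) 0 <;>
    simp [hq, beq_eq_decide]

theorem pvB_sum_eq_pvTri (m : List Bool) :
    (((List.range (m.length / 3)).map
      (fun k => if ((m.drop (3 * k)).take 3).all id then (1 : Int) else 0)).sum) = pvTri m := by
  induction m using pvTri.induct with
  | case1 a b c r ih =>
    have hlen : (a :: b :: c :: r).length / 3 = r.length / 3 + 1 := by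
      simp only [List.length_cons]; omega
    rw [hlen, List.range_succ_eq_map, List.map_cons, List.map_map, List.sum_cons, pvTri, ← ih]
    have hhead : (if (((a :: b :: c :: r).drop (3 * 0)).take 3).all id then (1 : Int) else 0)
        = (if a && b && c then (1 : Int) else 0) := by
      cases a <;> cases b <;> cases c <;> simp
    rw [hhead]
    congr 1
  | case2 t h =>
    match t, h with
    | [], _ => simp [pvTri]
    | [a], _ => simp [pvTri]
    | [a, b], _ => simp [pvTri]
    | a :: b :: c :: r, h => exact (h a b c r rfl).elim

theorem pvB_eq_pvTri (gen solucion : List Int) :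
    adaptacion_3sat_alt gen solucion = pvTri (pvMatch gen solucion) := by
  have hmlist : (PySem.List.pyRange 0 (gen.length : Int) 1).map
      (fun i => PySem.List.pyGetD gen i 0 == PySem.List.pyGetD solucion i 0) = pvMatch gen solucion := by
    unfold pvMatch
    rw [PySem.List.pyRange_zero_natCast, List.map_map]
    exact List.map_congr_left (fun i _ => rfl)
  unfold adaptacion_3sat_alt
  simp only [hmlist]
  have hmlen : (pvMatch gen solucion).length = gen.length := by
    unfold pvMatch; simp
  have hdiv : PySem.Int.floordiv ((gen.length : Nat) : Int) 3 = ((gen.length / 3 : Nat) : Int) := by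
    exact_mod_cast PySem.Int.floordiv_natCast gen.length 3
  rw [hdiv, PySem.List.pyRange_zero_natCast, List.map_map,
    ← pvB_sum_eq_pvTri (pvMatch gen solucion), hmlen]
  congr 1
  apply List.map_congr_left
  intro k _
  simp only [Function.comp]
  have h3 : (3 : Int) * ((k : Nat) : Int) = ((3 * k : Nat) : Int) := by push_cast; ring
  have h3' : ((3 * k : Nat) : Int) + 3 = ((3 * k : Nat) : Int) + ((3 : Nat) : Int) := by norm_num
  rw [h3, h3', PySem.List.slice_natCast_add]

-- ===== VERDICT (by name: the statement is the Claim_ definition above) =====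
theorem adaptacion_3sat_spec : Claim_equal_adaptacion_3sat := by
  intro gen solucion _ _
  unfold Spec_adaptacion_3sat
  rw [pvA_eq_foldl, pvB_eq_pvTri, pvFoldl_eq_pvTri]
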